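-- pv_equiv track=rewrite | github.com/Dies-Irae-mu/game | world/wod20th/utils/xp_costs.py | calculate_art_cost
-- ===== SOURCE A (Python) =====
-- def calculate_art_cost(current_rating: int, new_rating: int) -> int:
--     """
--     Calculate XP cost for Changeling arts.
--     Cost is 7 XP then Current Rating * 4 XP.
--
--     Args:
--         current_rating (int): Current art rating
--         new_rating (int): Desired new rating
--
--     Returns:
--         int: Total XP cost
--
--     Example:
--         7 for first dot, then 4 (1->2), 8 (2->3), 12 (3->4), 16 (4->5) XP
--     """
--     total_cost = 0
--     if current_rating == 0:
--         total_cost = 7  # Initial cost for first dot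
--         current_rating = 1
--
--     for rating in range(current_rating, new_rating):
--         total_cost += rating * 4
--     return total_cost
-- ===== SOURCE B (Python) =====
-- def calculate_art_cost(current_rating: int, new_rating: int) -> int:
--     """Closed-form: optional 7 XP initial cost plus arithmetic-series sum, as one expression."""
--     lo = 1 if current_rating == 0 else current_rating
--     hi = max(new_rating, lo)
--     return (7 if current_rating == 0 else 0) + 2 * (hi - lo) * (lo + hi - 1)
-- ===== Notes on version B (the rewrite author's own statement) =====
-- stated objective: faster
-- what changed: Replaced A's range loop with a single closed-form expression: effective start lo, clamped end hi = max(new, lo), then base + 2*(hi-lo)*(lo+hi-1) (arithmetic series), no loop and no variable rebinding.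
import Mathlib
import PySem

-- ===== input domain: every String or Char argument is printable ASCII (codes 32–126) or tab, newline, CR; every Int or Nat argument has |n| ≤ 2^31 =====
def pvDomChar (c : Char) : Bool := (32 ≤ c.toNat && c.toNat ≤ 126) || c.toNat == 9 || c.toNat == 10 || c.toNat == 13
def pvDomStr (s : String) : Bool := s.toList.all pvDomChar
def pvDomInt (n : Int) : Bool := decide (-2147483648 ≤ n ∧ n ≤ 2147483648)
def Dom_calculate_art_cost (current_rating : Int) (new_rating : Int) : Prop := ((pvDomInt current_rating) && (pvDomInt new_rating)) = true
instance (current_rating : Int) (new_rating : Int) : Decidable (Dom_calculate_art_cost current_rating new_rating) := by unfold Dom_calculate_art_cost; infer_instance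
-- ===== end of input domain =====

-- B replaces A's XP loop by a single closed-form arithmetic-series expression (O(1) instead of O(new_rating)).
-- ===== PORT A =====
def calculate_art_cost (current_rating : Int) (new_rating : Int) : Int :=
  let total_cost : Int := 0
  let (total_cost, current_rating) :=
    if current_rating = 0 then (7, (1 : Int)) else (total_cost, current_rating)
  (PySem.List.pyRange current_rating new_rating 1).foldl
    (fun acc rating => acc + rating * 4) total_cost

-- ===== PORT B =====
def calculate_art_cost_alt (current_rating : Int) (new_rating : Int) : Int :=
  let lo : Int := if current_rating = 0 then 1 else current_rating
  let hi : Int := max new_rating lo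
  (if current_rating = 0 then (7 : Int) else 0) + 2 * (hi - lo) * (lo + hi - 1)

-- ===== PRECONDITION & SPEC =====
def Spec_calculate_art_cost (current_rating : Int) (new_rating : Int) (out : Int) : Prop := out = calculate_art_cost_alt current_rating new_rating
instance (current_rating : Int) (new_rating : Int) (out : Int) : Decidable (Spec_calculate_art_cost current_rating new_rating out) := by unfold Spec_calculate_art_cost; infer_instance

-- ===== CLAIM (what is proved, stated in full; the proofs are below) =====
def Claim_equal_calculate_art_cost : Prop := ∀ (current_rating : Int) (new_rating : Int), Dom_calculate_art_cost current_rating new_rating → Spec_calculate_art_cost current_rating new_rating (calculate_art_cost current_rating new_rating)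

-- ===== LEMMAS AND PROOFS =====
theorem foldl_mul4_closed (a b init : Int) :
    (PySem.List.pyRange a b 1).foldl (fun acc r => acc + r * 4) init =
      init + (if a < b then 2 * (b - a) * (a + b - 1) else 0) := by
  by_cases h : a < b
  · have hn : (b - a).toNat ≠ 0 := by omega
    generalize hk : (b - a).toNat = k at *
    induction k generalizing a init with
    | zero => omega
    | succ k ih =>
      rw [PySem.List.pyRange_one_cons h]
      simp only [List.foldl_cons]
      by_cases h2 : a + 1 < b
      · rw [ih (a+1) (init + a * 4) h2 (by omega) (by omega)]
        simp only [if_pos h, if_pos h2]; ring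
      · have : b = a + 1 := by omega
        subst this
        rw [PySem.List.pyRange_one_eq_nil (by omega)]
        simp only [List.foldl_nil, if_pos h]; ring
  · rw [PySem.List.pyRange_one_eq_nil (by omega)]
    simp [h]

-- ===== VERDICT (by name: the statement is the Claim_ definition above) =====
theorem calculate_art_cost_spec : Claim_equal_calculate_art_cost := by
  intro c n _
  unfold Spec_calculate_art_cost calculate_art_cost calculate_art_cost_alt
  by_cases hc : c = 0 <;>
    simp only [hc, reduceIte, foldl_mul4_closed, max_def] <;>
    split_ifs <;> (first | ring1 | (exfalso; omega))
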